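-- pv_equiv track=rewrite | github.com/shubhamoli/practice | leetcode/medium/1395-Count_number_of_teams.py | numTeams_OTHER
-- ===== SOURCE A (Python) =====
-- from typing import List
--
-- def numTeams_OTHER(rating: List[int]) -> int:
--
--     count = 0
--
--     for i in range(len(rating)):
--         ls, rg = 0, 0
--         lg, rs = 0, 0
--         for j in range(i):
--             if rating[i] < rating[j]:
--                 ls += 1
--             elif rating[i] > rating[j]:
--                 lg += 1
--
--         for k in range(i+1, len(rating)):
--             if rating[i] < rating[k]:
--                 rs += 1
--             elif rating[i] > rating[k]:
--                 rg += 1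
--
--         count += (ls * rg) + (lg * rs)
--
--     return count
-- ===== SOURCE B (Python) =====
-- from typing import List
--
-- def numTeams_OTHER(rating: List[int]) -> int:
--     # DP by last element: scan left only, reuse per-index left counts.
--     n = len(rating)
--     inc1 = []   # inc1[j] = number of i < j with rating[i] < rating[j]
--     dec1 = []   # dec1[j] = number of i < j with rating[i] > rating[j]
--     total = 0
--     for k in range(n):
--         lt = 0
--         gt = 0
--         for j in range(k):
--             if rating[j] < rating[k]:
--                 lt += 1
--                 total += inc1[j]
--             elif rating[j] > rating[k]:
--                 gt += 1
--                 total += dec1[j]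
--         inc1.append(lt)
--         dec1.append(gt)
--     return total
-- ===== Notes on version B (the rewrite author's own statement) =====
-- stated objective: alternative
-- what changed: B counts monotone triples by their LAST element with a left-to-right DP (arrays of per-index left-smaller/left-greater counts that are reused), instead of A's per-MIDDLE-element two-sided scan combined by a product formula; B scans only to the left of each index.
import Mathlib
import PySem

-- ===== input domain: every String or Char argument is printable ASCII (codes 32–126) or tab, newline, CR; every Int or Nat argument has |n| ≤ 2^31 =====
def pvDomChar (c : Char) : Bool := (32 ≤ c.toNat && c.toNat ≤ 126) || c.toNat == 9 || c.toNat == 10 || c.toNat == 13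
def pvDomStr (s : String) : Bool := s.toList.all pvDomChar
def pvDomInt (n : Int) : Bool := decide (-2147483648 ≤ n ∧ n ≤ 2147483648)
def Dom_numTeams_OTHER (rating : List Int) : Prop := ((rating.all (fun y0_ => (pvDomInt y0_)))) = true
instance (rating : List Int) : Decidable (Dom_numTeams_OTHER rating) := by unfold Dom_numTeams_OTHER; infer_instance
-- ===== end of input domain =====

-- B counts monotone triples by their last element with a left-to-right DP instead of
-- A's per-middle-element two-sided scan with a product formula (objective: alternative).

-- ===== PORT A =====
-- the two inner loops of A: count strictly-greater / strictly-smaller neighbours of ri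
def stepA (ri : Int) (rating : List Int) (p : Int × Int) (j : Int) : Int × Int :=
  let rj := PySem.List.pyGetD rating j 0
  if ri < rj then (p.1 + 1, p.2)
  else if ri > rj then (p.1, p.2 + 1)
  else p

def numTeams_OTHER (rating : List Int) : Int :=
  (PySem.List.pyRange 0 (rating.length : Int) 1).foldl (fun count i =>
    let ri := PySem.List.pyGetD rating i 0
    let l := (PySem.List.pyRange 0 i 1).foldl (stepA ri rating) (0, 0)
    let rr := (PySem.List.pyRange (i + 1) (rating.length : Int) 1).foldl (stepA ri rating) (0, 0)
    count + (l.1 * rr.2 + l.2 * rr.1)) 0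

-- ===== PORT B =====
-- B's inner loop: state (lt, gt, total)
def stepBInner (rk : Int) (rating inc1 dec1 : List Int) (q : Int × Int × Int) (j : Int) :
    Int × Int × Int :=
  let rj := PySem.List.pyGetD rating j 0
  if rj < rk then (q.1 + 1, q.2.1, q.2.2 + PySem.List.pyGetD inc1 j 0)
  else if rj > rk then (q.1, q.2.1 + 1, q.2.2 + PySem.List.pyGetD dec1 j 0)
  else q

-- B's outer loop: state (inc1, dec1, total)
def stepB (rating : List Int) (st : List Int × List Int × Int) (k : Int) :
    List Int × List Int × Int :=
  let rk := PySem.List.pyGetD rating k 0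
  let res := (PySem.List.pyRange 0 k 1).foldl (stepBInner rk rating st.1 st.2.1) (0, 0, st.2.2)
  (st.1 ++ [res.1], st.2.1 ++ [res.2.1], res.2.2)

def numTeams_OTHER_alt (rating : List Int) : Int :=
  ((PySem.List.pyRange 0 (rating.length : Int) 1).foldl (stepB rating) ([], [], 0)).2.2

-- ===== PRECONDITION & SPEC =====
def Spec_numTeams_OTHER (rating : List Int) (out : Int) : Prop := out = numTeams_OTHER_alt rating
instance (rating : List Int) (out : Int) : Decidable (Spec_numTeams_OTHER rating out) := by unfold Spec_numTeams_OTHER; infer_instance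

-- ===== CLAIM (what is proved, stated in full; the proofs are below) =====
def Claim_equal_numTeams_OTHER : Prop := ∀ (rating : List Int), Dom_numTeams_OTHER rating → Spec_numTeams_OTHER rating (numTeams_OTHER rating)

-- ===== LEMMAS AND PROOFS =====

-- left strictly-greater / strictly-smaller counts at index i
def lsF (r : List Int) (i : Int) : Int :=
  ((PySem.List.pyRange 0 i 1).map (fun j =>
    if PySem.List.pyGetD r i 0 < PySem.List.pyGetD r j 0 then (1 : Int) else 0)).sum
def lgF (r : List Int) (i : Int) : Int :=
  ((PySem.List.pyRange 0 i 1).map (fun j =>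
    if PySem.List.pyGetD r j 0 < PySem.List.pyGetD r i 0 then (1 : Int) else 0)).sum
-- right strictly-smaller / strictly-greater counts at index i
def rsF (r : List Int) (i : Int) : Int :=
  ((PySem.List.pyRange (i + 1) (r.length : Int) 1).map (fun k =>
    if PySem.List.pyGetD r i 0 < PySem.List.pyGetD r k 0 then (1 : Int) else 0)).sum
def rgF (r : List Int) (i : Int) : Int :=
  ((PySem.List.pyRange (i + 1) (r.length : Int) 1).map (fun k =>
    if PySem.List.pyGetD r k 0 < PySem.List.pyGetD r i 0 then (1 : Int) else 0)).sum
-- number of monotone triples with middle j and last k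
def hF (r : List Int) (j k : Int) : Int :=
  if PySem.List.pyGetD r j 0 < PySem.List.pyGetD r k 0 then lgF r j
  else if PySem.List.pyGetD r k 0 < PySem.List.pyGetD r j 0 then lsF r j
  else 0

-- A's pair fold counts both comparisons
lemma stepA_foldl (ri : Int) (r : List Int) :
    ∀ (L : List Int) (a b : Int),
      L.foldl (stepA ri r) (a, b) =
        (a + (L.map (fun j => if ri < PySem.List.pyGetD r j 0 then (1 : Int) else 0)).sum,
         b + (L.map (fun j => if PySem.List.pyGetD r j 0 < ri then (1 : Int) else 0)).sum) := by
  intro L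
  induction L with
  | nil => intro a b; simp
  | cons x t ih =>
    intro a b
    simp only [List.foldl_cons, List.map_cons, List.sum_cons, stepA, gt_iff_lt]
    rcases lt_trichotomy ri (PySem.List.pyGetD r x 0) with h | h | h
    · simp only [if_pos h, if_neg (lt_asymm h)]
      rw [ih]; simp only [Prod.mk.injEq]; constructor <;> ring
    · simp only [if_neg (by omega : ¬ ri < PySem.List.pyGetD r x 0),
        if_neg (by omega : ¬ PySem.List.pyGetD r x 0 < ri)]
      rw [ih]; simp only [Prod.mk.injEq]; constructor <;> ring
    · simp only [if_neg (lt_asymm h), if_pos h]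
      rw [ih]; simp only [Prod.mk.injEq]; constructor <;> ring

-- B's inner fold characterization
lemma stepBInner_foldl (rk : Int) (r inc1 dec1 : List Int) :
    ∀ (L : List Int) (a b t : Int),
      L.foldl (stepBInner rk r inc1 dec1) (a, b, t) =
        (a + (L.map (fun j => if PySem.List.pyGetD r j 0 < rk then (1 : Int) else 0)).sum,
         b + (L.map (fun j => if rk < PySem.List.pyGetD r j 0 then (1 : Int) else 0)).sum,
         t + (L.map (fun j =>
            if PySem.List.pyGetD r j 0 < rk then PySem.List.pyGetD inc1 j 0
            else if rk < PySem.List.pyGetD r j 0 then PySem.List.pyGetD dec1 j 0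
            else 0)).sum) := by
  intro L
  induction L with
  | nil => intro a b t; simp
  | cons x s ih =>
    intro a b t
    simp only [List.foldl_cons, List.map_cons, List.sum_cons, stepBInner, gt_iff_lt]
    rcases lt_trichotomy (PySem.List.pyGetD r x 0) rk with h | h | h
    · simp only [if_pos h, if_neg (lt_asymm h)]
      rw [ih]; simp only [Prod.mk.injEq]; refine ⟨by ring, by ring, by ring⟩
    · simp only [if_neg (by omega : ¬ PySem.List.pyGetD r x 0 < rk),
        if_neg (by omega : ¬ rk < PySem.List.pyGetD r x 0)]
      rw [ih]; simp only [Prod.mk.injEq]; refine ⟨by ring, by ring, by ring⟩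
    · simp only [if_neg (lt_asymm h), if_pos h]
      rw [ih]; simp only [Prod.mk.injEq]; refine ⟨by ring, by ring, by ring⟩

-- B's outer invariant: after m steps, inc1/dec1 hold the left counts and
-- total is the triple count of the prefix, grouped by last element
lemma stepB_foldl (r : List Int) :
    ∀ (m : Nat),
      (PySem.List.pyRange 0 (m : Int) 1).foldl (stepB r) ([], [], 0) =
        ((PySem.List.pyRange 0 (m : Int) 1).map (lgF r),
         (PySem.List.pyRange 0 (m : Int) 1).map (lsF r),
         ((PySem.List.pyRange 0 (m : Int) 1).map (fun k =>
            ((PySem.List.pyRange 0 k 1).map (fun j => hF r j k)).sum)).sum) := by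
  intro m
  induction m with
  | zero => simp [PySem.List.pyRange_zero]
  | succ m ih =>
    have hcast : ((m + 1 : Nat) : Int) = (m : Int) + 1 := by push_cast; ring
    rw [hcast, PySem.List.pyRange_one_succ_right (by positivity : (0 : Int) ≤ (m : Int)),
        List.foldl_append, ih]
    simp only [List.foldl_cons, List.foldl_nil, List.map_append, List.map_cons, List.map_nil,
      List.sum_append, List.sum_cons, List.sum_nil]
    unfold stepB
    simp only []
    rw [stepBInner_foldl]
    simp only [Prod.mk.injEq]
    refine ⟨?_, ?_, ?_⟩
    · simp [lgF]
    · simp [lsF]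
    · have hbig : (PySem.List.pyRange 0 (m : Int) 1).map (fun j =>
          if PySem.List.pyGetD r j 0 < PySem.List.pyGetD r (m : Int) 0 then
            PySem.List.pyGetD ((PySem.List.pyRange 0 (m : Int) 1).map (lgF r)) j 0
          else if PySem.List.pyGetD r (m : Int) 0 < PySem.List.pyGetD r j 0 then
            PySem.List.pyGetD ((PySem.List.pyRange 0 (m : Int) 1).map (lsF r)) j 0
          else 0) = (PySem.List.pyRange 0 (m : Int) 1).map (fun j => hF r j (m : Int)) := by
        refine List.map_congr_left (fun j hj => ?_)
        obtain ⟨hj0, hjm⟩ := (PySem.List.mem_pyRange_one).1 hj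
        rw [PySem.List.pyGetD_map_pyRange_of_nonneg (lgF r) _ _ _ hj0 hjm,
            PySem.List.pyGetD_map_pyRange_of_nonneg (lsF r) _ _ _ hj0 hjm]
        rfl
      rw [hbig]
      ring

-- A's per-pivot product equals the sum over right neighbours of hF
lemma termA_eq_sum (r : List Int) (i : Int) :
    lsF r i * rgF r i + lgF r i * rsF r i =
      ((PySem.List.pyRange (i + 1) (r.length : Int) 1).map (fun k => hF r i k)).sum := by
  have hpt : ((PySem.List.pyRange (i + 1) (r.length : Int) 1).map (fun k => hF r i k)) =
      ((PySem.List.pyRange (i + 1) (r.length : Int) 1).map (fun k =>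
        lsF r i * (if PySem.List.pyGetD r k 0 < PySem.List.pyGetD r i 0 then (1 : Int) else 0) +
        lgF r i * (if PySem.List.pyGetD r i 0 < PySem.List.pyGetD r k 0 then (1 : Int) else 0))) := by
    refine List.map_congr_left (fun k _ => ?_)
    simp only [hF]
    rcases lt_trichotomy (PySem.List.pyGetD r i 0) (PySem.List.pyGetD r k 0) with h | h | h
    · rw [if_pos h, if_neg (lt_asymm h), if_pos h]; ring
    · rw [if_neg (by omega), if_neg (by omega), if_neg (by omega), if_neg (by omega)]; ring
    · rw [if_neg (lt_asymm h), if_pos h, if_pos h, if_neg (lt_asymm h)]; ring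
  rw [hpt, PySem.List.sum_map_add_int, List.sum_map_mul_left, List.sum_map_mul_left,
      ← rgF, ← rsF]

-- the triangle swap: summing hF by middle-then-last equals last-then-middle
lemma triangle (r : List Int) :
    ∀ (m : Nat),
      ((PySem.List.pyRange 0 (m : Int) 1).map (fun j =>
        ((PySem.List.pyRange (j + 1) (m : Int) 1).map (fun k => hF r j k)).sum)).sum =
      ((PySem.List.pyRange 0 (m : Int) 1).map (fun k =>
        ((PySem.List.pyRange 0 k 1).map (fun j => hF r j k)).sum)).sum := by
  intro m
  induction m with
  | zero => simp [PySem.List.pyRange_zero]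
  | succ m ih =>
    have hcast : ((m + 1 : Nat) : Int) = (m : Int) + 1 := by push_cast; ring
    rw [hcast, PySem.List.pyRange_one_succ_right (by positivity : (0 : Int) ≤ (m : Int))]
    simp only [List.map_append, List.map_cons, List.map_nil, List.sum_append, List.sum_cons,
      List.sum_nil]
    have hinner : ((PySem.List.pyRange 0 (m : Int) 1).map (fun j =>
        ((PySem.List.pyRange (j + 1) ((m : Int) + 1) 1).map (fun k => hF r j k)).sum)) =
        ((PySem.List.pyRange 0 (m : Int) 1).map (fun j =>
          ((PySem.List.pyRange (j + 1) (m : Int) 1).map (fun k => hF r j k)).sum +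
            hF r j (m : Int))) := by
      refine List.map_congr_left (fun j hj => ?_)
      obtain ⟨hj0, hjm⟩ := (PySem.List.mem_pyRange_one).1 hj
      rw [PySem.List.pyRange_one_succ_right (by omega : j + 1 ≤ (m : Int))]
      simp
    rw [hinner, PySem.List.sum_map_add_int,
        PySem.List.pyRange_one_eq_nil (by omega : (m : Int) + 1 ≤ (m : Int) + 1)]
    simp only [List.map_nil, List.sum_nil, add_zero]
    rw [ih]

-- A's closed form: sum over pivots of the product formula
lemma portA_closed (r : List Int) :
    numTeams_OTHER r =
      ((PySem.List.pyRange 0 (r.length : Int) 1).map (fun i =>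
        lsF r i * rgF r i + lgF r i * rsF r i)).sum := by
  unfold numTeams_OTHER
  have hfun : (fun (count i : Int) =>
      let ri := PySem.List.pyGetD r i 0
      let l := (PySem.List.pyRange 0 i 1).foldl (stepA ri r) (0, 0)
      let rr := (PySem.List.pyRange (i + 1) (r.length : Int) 1).foldl (stepA ri r) (0, 0)
      count + (l.1 * rr.2 + l.2 * rr.1)) =
      (fun (count i : Int) => count + (lsF r i * rgF r i + lgF r i * rsF r i)) := by
    funext count i
    simp only [stepA_foldl, lsF, lgF, rsF, rgF]
    ring
  rw [hfun, PySem.List.foldl_add, zero_add]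

-- ===== VERDICT (by name: the statement is the Claim_ definition above) =====
theorem numTeams_OTHER_spec : Claim_equal_numTeams_OTHER := by
  intro rating _
  unfold Spec_numTeams_OTHER
  rw [portA_closed]
  unfold numTeams_OTHER_alt
  rw [stepB_foldl rating rating.length, ← triangle rating rating.length]
  exact congrArg List.sum (List.map_congr_left (fun i _ => termA_eq_sum rating i))
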